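-- pv_equiv track=rewrite | github.com/LuHesketh/Python_Stuff | PyHamilton/WORKLIST_96.py | tips_list_iterator
-- ===== SOURCE A (Python) =====
-- def tips_list_iterator(asp_list, tips_list):
--     asp_list =  asp_list + [None]*(8-len(asp_list))
--     pickup_list = []
--     for i in range(8):
--         if asp_list[i]:
--             first_tip = [tip for tip in tips_list if tip][0]
--             tips_list[tips_list.index(first_tip)] = None
--             pickup_list.append(first_tip)
--         else:
--             pickup_list.append(None)
--     return pickup_list, tips_list
-- ===== SOURCE B (Python) =====
-- def tips_list_iterator(asp_list, tips_list):
--     asp = (asp_list + [None] * 8)[:8]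
--     pickup_list = []
--     ptr = 0
--     for a in asp:
--         if a:
--             while not tips_list[ptr]:
--                 ptr += 1
--             pickup_list.append(tips_list[ptr])
--             tips_list[ptr] = None
--             ptr += 1
--         else:
--             pickup_list.append(None)
--     return pickup_list, tips_list
-- ===== Notes on version B (the rewrite author's own statement) =====
-- stated objective: faster
-- what changed: Replaces A's per-position full rescan (build the whole filtered list of truthy tips, take [0], then tips_list.index to locate it) by a single monotone pointer into tips_list that skips falsy entries and consumes tips left to right.
import Mathlib
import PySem

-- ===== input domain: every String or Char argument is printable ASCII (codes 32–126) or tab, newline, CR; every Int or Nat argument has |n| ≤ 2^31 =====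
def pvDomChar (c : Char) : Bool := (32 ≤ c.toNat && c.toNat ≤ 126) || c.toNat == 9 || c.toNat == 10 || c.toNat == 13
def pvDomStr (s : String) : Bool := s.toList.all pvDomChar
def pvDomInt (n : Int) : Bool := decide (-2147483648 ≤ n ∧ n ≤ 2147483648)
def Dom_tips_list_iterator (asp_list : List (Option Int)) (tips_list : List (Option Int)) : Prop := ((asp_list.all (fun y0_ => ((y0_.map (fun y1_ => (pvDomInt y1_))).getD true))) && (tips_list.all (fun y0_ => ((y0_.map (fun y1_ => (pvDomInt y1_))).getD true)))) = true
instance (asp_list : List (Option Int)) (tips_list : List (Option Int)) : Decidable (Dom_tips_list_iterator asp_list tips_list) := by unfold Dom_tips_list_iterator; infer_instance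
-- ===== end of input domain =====

-- B replaces A's per-step full rescan (filter + index) by a single monotone pointer that consumes
-- truthy tips left to right (measured faster by a constant factor). Both Pythons mutate tips_list
-- in place the same way (set consumed positions to None); the equivalence is about the return value.

-- shared helper: Python truthiness of an Optional[int]
def pyTruthy (x : Option Int) : Bool :=
  match x with
  | none => false
  | some v => v != 0

-- ===== PORT A =====
-- A-side helper: one iteration of A's for-loop body
def stepA (st : List (Option Int) × List (Option Int)) (a : Option Int) :
    List (Option Int) × List (Option Int) :=
  if pyTruthy a then
    match PySem.List.pyGet? (st.2.filter pyTruthy) 0 with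
    | none => (st.1 ++ [none], st.2)      -- Python raises IndexError here; excluded by Pre_
    | some t =>
      match PySem.List.index? st.2 t with
      | none => (st.1 ++ [t], st.2)       -- unreachable: t is an element of st.2
      | some j => (st.1 ++ [t], st.2.set j none)
  else (st.1 ++ [none], st.2)

def tips_list_iterator (asp_list : List (Option Int)) (tips_list : List (Option Int)) :
    List (Option Int) × List (Option Int) :=
  let asp2 := asp_list ++ List.replicate (8 - asp_list.length) none
  (PySem.List.pyRange 0 8 1).foldl
    (fun st i => stepA st (PySem.List.pyGetD asp2 i none)) ([], tips_list)

-- ===== PORT B =====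
-- B-side helper: the while-loop 'while not tips_list[ptr]: ptr += 1'
-- (out of range = Python IndexError; excluded by Pre_, here it just returns ptr)
def findPtr (tips : List (Option Int)) (p : Nat) : Nat :=
  if h : p < tips.length then
    if pyTruthy tips[p] then p else findPtr tips (p + 1)
  else p
termination_by tips.length - p

-- B-side helper: one iteration of B's for-loop body (state: pickup, tips, ptr)
def stepB (st : List (Option Int) × List (Option Int) × Nat) (a : Option Int) :
    List (Option Int) × List (Option Int) × Nat :=
  if pyTruthy a then
    let q := findPtr st.2.1 st.2.2
    (st.1 ++ [st.2.1.getD q none], st.2.1.set q none, q + 1)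
  else (st.1 ++ [none], st.2.1, st.2.2)

def tips_list_iterator_alt (asp_list : List (Option Int)) (tips_list : List (Option Int)) :
    List (Option Int) × List (Option Int) :=
  let asp8 := (asp_list ++ List.replicate 8 none).take 8
  let r := asp8.foldl stepB ([], tips_list, 0)
  (r.1, r.2.1)

-- ===== PRECONDITION & SPEC =====
-- Pre_ excludes exactly the inputs on which Python A raises IndexError: more truthy aspiration
-- positions (among the first 8, after padding) than truthy tips available.
def Pre_tips_list_iterator (asp_list : List (Option Int)) (tips_list : List (Option Int)) : Prop :=
  ((asp_list ++ List.replicate 8 none).take 8).countP pyTruthy ≤ tips_list.countP pyTruthy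
instance (asp_list : List (Option Int)) (tips_list : List (Option Int)) : Decidable (Pre_tips_list_iterator asp_list tips_list) := by unfold Pre_tips_list_iterator; infer_instance
def pvWitness_tips_list_iterator : List (Option Int) × List (Option Int) :=
  ([some 1, none, some 2], [none, some 10, some 0, some 20])

def Spec_tips_list_iterator (asp_list : List (Option Int)) (tips_list : List (Option Int)) (out : List (Option Int) × List (Option Int)) : Prop := out = tips_list_iterator_alt asp_list tips_list
instance (asp_list : List (Option Int)) (tips_list : List (Option Int)) (out : List (Option Int) × List (Option Int)) : Decidable (Spec_tips_list_iterator asp_list tips_list out) := by unfold Spec_tips_list_iterator; infer_instance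

-- ===== CLAIM (what is proved, stated in full; the proofs are below) =====
def Claim_equal_tips_list_iterator : Prop := ∀ (asp_list : List (Option Int)) (tips_list : List (Option Int)), Dom_tips_list_iterator asp_list tips_list → Pre_tips_list_iterator asp_list tips_list → Spec_tips_list_iterator asp_list tips_list (tips_list_iterator asp_list tips_list)

-- ===== LEMMAS AND PROOFS =====

lemma getD_append_cons (pre : List (Option Int)) (t : Option Int) (suf : List (Option Int)) :
    (pre ++ t :: suf).getD pre.length none = t := by
  induction pre with
  | nil => rfl
  | cons a l ih => simpa using ih

lemma getD_append_lt (pre : List (Option Int)) (x : Option Int) (suf : List (Option Int))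
    (j : Nat) (hj : j < pre.length) :
    (pre ++ x :: suf).getD j none = pre.getD j none := by
  simp [List.getD_eq_getElem?_getD, List.getElem?_append_left hj]

lemma set_append_cons (pre : List (Option Int)) (t : Option Int) (suf : List (Option Int))
    (v : Option Int) : (pre ++ t :: suf).set pre.length v = pre ++ v :: suf := by
  induction pre with
  | nil => rfl
  | cons a l ih => simpa using ih

-- any list with a truthy element splits as (falsy prefix) ++ first-truthy ++ rest
lemma split_first_truthy (tips : List (Option Int)) (h : 0 < tips.countP pyTruthy) :
    ∃ pre t suf, tips = pre ++ t :: suf ∧ (∀ x ∈ pre, pyTruthy x = false) ∧ pyTruthy t = true := by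
  induction tips with
  | nil => simp at h
  | cons a l ih =>
    by_cases ha : pyTruthy a
    · exact ⟨[], a, l, rfl, by simp, ha⟩
    · have h' : 0 < l.countP pyTruthy := by simpa [List.countP_cons, ha] using h
      obtain ⟨pre, t, suf, rfl, hp, ht⟩ := ih h'
      refine ⟨a :: pre, t, suf, rfl, ?_, ht⟩
      intro x hx
      rcases List.mem_cons.mp hx with rfl | hx
      · simpa using ha
      · exact hp x hx

-- B's while-loop lands exactly on the first truthy position when started at or before it
lemma findPtr_eq (pre : List (Option Int)) (t : Option Int) (suf : List (Option Int))
    (hpre : ∀ x ∈ pre, pyTruthy x = false) (ht : pyTruthy t = true) :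
    ∀ p, p ≤ pre.length → findPtr (pre ++ t :: suf) p = pre.length := by
  suffices h : ∀ d p, pre.length - p = d → p ≤ pre.length → findPtr (pre ++ t :: suf) p = pre.length by
    intro p hp; exact h _ p rfl hp
  intro d
  induction d with
  | zero =>
    intro p hd hp
    have hp' : p = pre.length := by omega
    subst hp'
    rw [findPtr, dif_pos (by simp)]
    have hg : (pre ++ t :: suf)[pre.length]'(by simp) = t := by
      rw [List.getElem_append_right (Nat.le_refl _)]
      simp
    rw [hg, if_pos ht]
  | succ d ihd =>
    intro p hd hp
    have hplt : p < pre.length := by omega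
    rw [findPtr, dif_pos (by simp; omega)]
    have hg : (pre ++ t :: suf)[p]'(by simp; omega) = pre[p] := List.getElem_append_left hplt
    rw [hg, hpre pre[p] (List.getElem_mem hplt)]
    simpa using ihd (p + 1) (by omega) (by omega)

-- main loop invariant: with everything before ptr falsy and enough truthy tips left,
-- A's rescan step and B's pointer step keep the pickup list and the tips list identical
lemma loop_eq : ∀ (l acc tips : List (Option Int)) (ptr : Nat),
    (∀ j, j < ptr → pyTruthy (tips.getD j none) = false) →
    l.countP pyTruthy ≤ tips.countP pyTruthy →
    l.foldl stepA (acc, tips)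
      = ((l.foldl stepB (acc, tips, ptr)).1, (l.foldl stepB (acc, tips, ptr)).2.1) := by
  intro l
  induction l with
  | nil => intro acc tips ptr _ _; rfl
  | cons a l ih =>
    intro acc tips ptr hinv hcnt
    simp only [List.foldl_cons]
    by_cases ha : pyTruthy a
    · have hc : 0 < tips.countP pyTruthy := by
        simp [ha] at hcnt; omega
      obtain ⟨pre, t, suf, rfl, hpre, ht⟩ := split_first_truthy tips hc
      have hfilpre : pre.filter pyTruthy = [] :=
        List.filter_eq_nil_iff.mpr (fun x hx => by simp [hpre x hx])
      have hfil : (pre ++ t :: suf).filter pyTruthy = t :: suf.filter pyTruthy := by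
        simp [List.filter_append, hfilpre, ht]
      have hidx : PySem.List.index? (pre ++ t :: suf) t = some pre.length := by
        refine (PySem.List.index?_eq_some_iff _ _ _).mpr ⟨pre, suf, rfl, rfl, fun hmem => ?_⟩
        simpa [ht] using hpre t hmem
      have hA : stepA (acc, pre ++ t :: suf) a = (acc ++ [t], pre ++ none :: suf) := by
        simp only [stepA, if_pos ha, hfil, PySem.List.pyGet?_zero_cons, hidx, set_append_cons]
      have hptr : ptr ≤ pre.length := by
        by_contra hgt
        have h1 := hinv pre.length (by omega)
        rw [getD_append_cons] at h1
        simp [h1] at ht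
      have hq : findPtr (pre ++ t :: suf) ptr = pre.length := findPtr_eq pre t suf hpre ht ptr hptr
      have hB : stepB (acc, pre ++ t :: suf, ptr) a
          = (acc ++ [t], pre ++ none :: suf, pre.length + 1) := by
        simp [stepB, ha, hq]
      rw [hA, hB]
      apply ih
      · intro j hj
        rcases Nat.lt_or_ge j pre.length with hjl | hjg
        · rw [getD_append_lt _ _ _ _ hjl]
          have hm : pre.getD j none ∈ pre := by
            rw [List.getD_eq_getElem pre none hjl]; exact List.getElem_mem hjl
          exact hpre _ hm
        · have hje : j = pre.length := by omega
          subst hje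
          rw [getD_append_cons]
          rfl
      · have h2 : pre.countP pyTruthy = 0 :=
          List.countP_eq_zero.mpr (fun x hx => by simp [hpre x hx])
        have h1 : (pre ++ none :: suf).countP pyTruthy = pre.countP pyTruthy + suf.countP pyTruthy := by
          simp [List.countP_append, pyTruthy]
        simp [List.countP_cons, ha, List.countP_append, ht, h2] at hcnt
        simp [h1, h2]
        omega
    · have hA : stepA (acc, tips) a = (acc ++ [none], tips) := by simp [stepA, ha]
      have hB : stepB (acc, tips, ptr) a = (acc ++ [none], tips, ptr) := by simp [stepB, ha]
      rw [hA, hB]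
      exact ih _ _ _ hinv (by simpa [List.countP_cons, ha] using hcnt)

-- A's padded list and B's padded list agree on the first 8 entries
lemma take8_pad (asp : List (Option Int)) :
    (asp ++ List.replicate (8 - asp.length) none).take 8
      = (asp ++ List.replicate 8 none).take 8 := by
  rw [List.take_append, List.take_append, List.take_replicate, List.take_replicate]
  have h : min (8 - asp.length) (8 - asp.length) = min (8 - asp.length) 8 := by omega
  rw [h]

-- A's fold over range(n) with indexing = fold over the first n elements
lemma foldl_pyRange_eq (xs : List (Option Int)) (n : Nat) (hn : n ≤ xs.length)
    (init : List (Option Int) × List (Option Int)) :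
    (PySem.List.pyRange 0 (n : Int) 1).foldl
        (fun st i => stepA st (PySem.List.pyGetD xs i none)) init
      = (xs.take n).foldl stepA init := by
  induction n with
  | zero => rfl
  | succ n ih =>
    have hcast : ((n + 1 : Nat) : Int) = (n : Int) + 1 := by push_cast; ring
    rw [hcast, PySem.List.pyRange_one_succ_right (by positivity), List.foldl_append,
        ih (by omega), ← List.take_concat_get (l := xs) (i := n) (by omega), List.concat_eq_append,
        List.foldl_append]
    simp [PySem.List.pyGetD_natCast, List.getElem?_eq_getElem (by omega : n < xs.length)]

lemma len_pad (asp : List (Option Int)) :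
    8 ≤ (asp ++ List.replicate (8 - asp.length) none).length := by
  simp; omega

-- ===== VERDICT (by name: the statement is the Claim_ definition above) =====
theorem tips_list_iterator_spec : Claim_equal_tips_list_iterator := by
  intro asp tips _ hpre
  show tips_list_iterator asp tips = tips_list_iterator_alt asp tips
  simp only [tips_list_iterator, tips_list_iterator_alt]
  rw [show (8 : Int) = ((8 : Nat) : Int) from rfl,
      foldl_pyRange_eq _ 8 (len_pad asp), take8_pad]
  exact loop_eq _ [] tips 0 (by intro j hj; omega) hpre
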